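-- pv_equiv track=rewrite | github.com/jlpienaar/combina | combina.py | similar_names
-- ===== SOURCE A (Python) =====
-- def similar_names(a, b, threshold = 2):
--     names1 = []
--     names2 = []
--     multimatch1 = set()
--     multimatch2 = set()
--     for name1 in a:
--         for name2 in b:
--             words1 = name1.lower().split()
--             words2 = name2.lower().split()
--             common = set(words1).intersection(words2)
--             if (len(common) >= threshold and words1[0] == words2[0]):
--                 if name1 in names1:
--                     multimatch1.add(name1)
--                 if name2 in names2:
--                     multimatch2.add(name2)
--                 names1.append(name1)
--                 names2.append(name2)
--     return names1, names2, multimatch1, multimatch2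
-- ===== SOURCE B (Python) =====
-- def similar_names(a, b, threshold=2):
--     # Bucket b's names by first word so only pairs sharing the first word are compared,
--     # and precompute each name's word set once instead of per pair.
--     buckets = {}
--     for name2 in b:
--         words = name2.lower().split()
--         if words:
--             buckets.setdefault(words[0], []).append((name2, set(words)))
--     names1 = []
--     names2 = []
--     for name1 in a:
--         words1 = name1.lower().split()
--         if words1:
--             ws1 = set(words1)
--             for name2, ws2 in buckets.get(words1[0], []):
--                 if len(ws1 & ws2) >= threshold:
--                     names1.append(name1)
--                     names2.append(name2)
--
--     def dups(names):
--         seen = set()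
--         out = set()
--         for s in names:
--             if s in seen:
--                 out.add(s)
--             else:
--                 seen.add(s)
--         return out
--
--     return names1, names2, dups(names1), dups(names2)
-- ===== Notes on version B (the rewrite author's own statement) =====
-- stated objective: faster
-- what changed: B buckets b's names by first word (built once, with each name's word-set precomputed) and compares each name of a only against its matching bucket, then derives the two multimatch sets by a single duplicate-scan over the result lists instead of membership tests inside the pair loop.
import Mathlib
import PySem

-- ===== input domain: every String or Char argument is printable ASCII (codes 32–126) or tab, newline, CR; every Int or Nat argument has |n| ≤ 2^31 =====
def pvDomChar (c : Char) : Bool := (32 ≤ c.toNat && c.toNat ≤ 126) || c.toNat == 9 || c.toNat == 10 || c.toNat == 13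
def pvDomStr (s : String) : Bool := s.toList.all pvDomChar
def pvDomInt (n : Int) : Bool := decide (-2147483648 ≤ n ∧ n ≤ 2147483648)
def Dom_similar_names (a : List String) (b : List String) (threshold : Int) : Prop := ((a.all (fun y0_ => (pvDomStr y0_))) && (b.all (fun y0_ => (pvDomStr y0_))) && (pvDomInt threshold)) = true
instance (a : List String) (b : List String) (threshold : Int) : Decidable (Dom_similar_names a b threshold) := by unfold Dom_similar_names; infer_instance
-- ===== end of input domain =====

-- B buckets b's names by first word with per-name word-sets precomputed once, and finds the
-- multimatch sets by a duplicate scan over the result lists, instead of A's all-pairs loop.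

-- ===== PORT A =====
-- name.lower().split()
def pvWords (s : String) : List String := PySem.Str.split₀ (PySem.Str.lower s)

-- body of A's inner loop over b; the `| _, _ => false` arm of the first-word comparison stands
-- where Python raises IndexError (words1[0] / words2[0] on an empty split, reachable only when
-- threshold <= 0; those inputs are excluded by Pre_similar_names)
def pvInnerA (threshold : Int) (name1 : String)
    (st : List String × List String × PySem.Set String × PySem.Set String) (name2 : String) :
    List String × List String × PySem.Set String × PySem.Set String :=
  let words1 := pvWords name1
  let words2 := pvWords name2
  let common := PySem.Set.inter (PySem.Set.ofList words1) words2
  if (decide (threshold ≤ PySem.Set.len common) &&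
      match words1, words2 with
      | x :: _, y :: _ => x == y
      | _, _ => false) then
    (st.1 ++ [name1], st.2.1 ++ [name2],
     if st.1.contains name1 then PySem.Set.add st.2.2.1 name1 else st.2.2.1,
     if st.2.1.contains name2 then PySem.Set.add st.2.2.2 name2 else st.2.2.2)
  else st

def similar_names (a : List String) (b : List String) (threshold : Int) :
    List String × List String × List String × List String :=
  let st := a.foldl (fun st name1 => b.foldl (pvInnerA threshold name1) st)
    ([], [], PySem.Set.empty, PySem.Set.empty)
  (st.1, st.2.1, st.2.2.1, st.2.2.2)

-- ===== PORT B =====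
-- Source B's dups helper: one pass collecting the names already seen and those seen twice
def pvDupsStep (p : PySem.Set String × PySem.Set String) (s : String) :
    PySem.Set String × PySem.Set String :=
  if p.1.contains s then (p.1, PySem.Set.add p.2 s) else (PySem.Set.add p.1 s, p.2)

def pvDups (names : List String) : PySem.Set String :=
  (names.foldl pvDupsStep (PySem.Set.empty, PySem.Set.empty)).2

-- Source B's first loop: buckets.setdefault(words[0], []).append((name2, set(words)))
def pvBuckets (b : List String) : PySem.Dict String (List (String × PySem.Set String)) :=
  b.foldl (fun d name2 =>
      let words := pvWords name2
      match words with
      | [] => d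
      | w0 :: _ => d.modify w0 [] (fun l => l ++ [(name2, PySem.Set.ofList words)]))
    PySem.Dict.empty

-- body of Source B's loop over a matching bucket
def pvInnerB (threshold : Int) (name1 : String) (ws1 : PySem.Set String)
    (p : List String × List String) (e : String × PySem.Set String) :
    List String × List String :=
  if decide (threshold ≤ PySem.Set.len (PySem.Set.inter ws1 e.2)) then
    (p.1 ++ [name1], p.2 ++ [e.1])
  else p

-- body of Source B's loop over a
def pvOuterB (buckets : PySem.Dict String (List (String × PySem.Set String))) (threshold : Int)
    (p : List String × List String) (name1 : String) : List String × List String :=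
  let words1 := pvWords name1
  match words1 with
  | [] => p
  | w0 :: _ => (buckets.getD w0 []).foldl (pvInnerB threshold name1 (PySem.Set.ofList words1)) p

def similar_names_alt (a : List String) (b : List String) (threshold : Int) :
    List String × List String × List String × List String :=
  let buckets := pvBuckets b
  let p := a.foldl (pvOuterB buckets threshold) ([], [])
  (p.1, p.2, pvDups p.1, pvDups p.2)

-- ===== PRECONDITION & SPEC =====
-- Pre_ excludes exactly the inputs on which Python A raises IndexError: threshold <= 0 with both
-- lists nonempty and some name splitting to no words (words1[0]/words2[0] on an empty list).
def Pre_similar_names (a : List String) (b : List String) (threshold : Int) : Prop :=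
  1 ≤ threshold ∨ a = [] ∨ b = [] ∨ ∀ s ∈ a ++ b, pvWords s ≠ []
instance (a : List String) (b : List String) (threshold : Int) : Decidable (Pre_similar_names a b threshold) := by unfold Pre_similar_names; infer_instance

def pvWitness_similar_names : List String × List String × Int :=
  (["John Smith", "mary ann lee"], ["john  smith jr", "Mary Lee"], 2)

def Spec_similar_names (a : List String) (b : List String) (threshold : Int) (out : List String × List String × List String × List String) : Prop := out = similar_names_alt a b threshold
instance (a : List String) (b : List String) (threshold : Int) (out : List String × List String × List String × List String) : Decidable (Spec_similar_names a b threshold out) := by unfold Spec_similar_names; infer_instance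

-- ===== CLAIM (what is proved, stated in full; the proofs are below) =====
def Claim_equal_similar_names : Prop := ∀ (a : List String) (b : List String) (threshold : Int), Dom_similar_names a b threshold → Pre_similar_names a b threshold → Spec_similar_names a b threshold (similar_names a b threshold)


-- ===== LEMMAS AND PROOFS =====

-- A's acceptance test for a pair, and the sublist of b a given name1 is paired with
def pvCondA (threshold : Int) (words1 words2 : List String) : Bool :=
  decide (threshold ≤ PySem.Set.len (PySem.Set.inter (PySem.Set.ofList words1) words2)) &&
    (match words1, words2 with
     | x :: _, y :: _ => x == y
     | _, _ => false)

def pvMatched (threshold : Int) (b : List String) (n1 : String) : List String :=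
  b.filter (fun n2 => pvCondA threshold (pvWords n1) (pvWords n2))

def pvStepA (n1 : String) (st : List String × List String × PySem.Set String × PySem.Set String)
    (n2 : String) : List String × List String × PySem.Set String × PySem.Set String :=
  (st.1 ++ [n1], st.2.1 ++ [n2],
   if st.1.contains n1 then PySem.Set.add st.2.2.1 n1 else st.2.2.1,
   if st.2.1.contains n2 then PySem.Set.add st.2.2.2 n2 else st.2.2.2)

lemma pvDupsFold_fst (l : List String) : ∀ (s o : PySem.Set String),
    (l.foldl pvDupsStep (s, o)).1 = PySem.Set.update s l := by
  induction l with
  | nil => intro s o; simp [PySem.Set.update]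
  | cons x xs ih =>
    intro s o
    rw [PySem.Set.update_cons]
    by_cases h : x ∈ s
    · simp [List.foldl_cons, pvDupsStep, PySem.Set.contains_eq_listContains,
        List.contains_eq_mem, h, ih]
    · simp [List.foldl_cons, pvDupsStep, PySem.Set.contains_eq_listContains,
        List.contains_eq_mem, h, ih]

lemma pvDups_snoc (l : List String) (x : String) :
    pvDups (l ++ [x]) =
      if l.contains x then PySem.Set.add (pvDups l) x else pvDups l := by
  unfold pvDups
  rw [List.foldl_append, List.foldl_cons, List.foldl_nil]
  simp only [pvDupsStep]
  rw [pvDupsFold_fst]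
  simp [PySem.Set.contains_eq_listContains, List.contains_eq_mem, apply_ite Prod.snd]

lemma pvStepA_shape (n1 n2 : String) (N1 N2 : List String) :
    pvStepA n1 (N1, N2, pvDups N1, pvDups N2) n2 =
      (N1 ++ [n1], N2 ++ [n2], pvDups (N1 ++ [n1]), pvDups (N2 ++ [n2])) := by
  simp [pvStepA, pvDups_snoc]

lemma pvFoldStepA (n1 : String) (m : List String) : ∀ (N1 N2 : List String),
    m.foldl (pvStepA n1) (N1, N2, pvDups N1, pvDups N2) =
      (N1 ++ m.map (fun _ => n1), N2 ++ m,
       pvDups (N1 ++ m.map (fun _ => n1)), pvDups (N2 ++ m)) := by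
  induction m with
  | nil => intro N1 N2; simp
  | cons x xs ih =>
    intro N1 N2
    rw [List.foldl_cons, pvStepA_shape, ih]
    simp

-- the bucket for key w0 is exactly b's names whose first word is w0, in order, with their sets
lemma pvBuckets_getD (b : List String) (w0 : String) :
    (pvBuckets b).getD w0 [] =
      (b.filter (fun n2 =>
          match pvWords n2 with
          | [] => false
          | y :: _ => y == w0)).map (fun n2 => (n2, PySem.Set.ofList (pvWords n2))) := by
  unfold pvBuckets
  suffices h : ∀ (l : List String) (d : PySem.Dict String (List (String × PySem.Set String))),
      (l.foldl (fun d name2 =>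
        let words := pvWords name2
        match words with
        | [] => d
        | w0 :: _ => d.modify w0 [] (fun l => l ++ [(name2, PySem.Set.ofList words)])) d).getD w0 []
      = d.getD w0 [] ++ (l.filter (fun n2 =>
          match pvWords n2 with
          | [] => false
          | y :: _ => y == w0)).map (fun n2 => (n2, PySem.Set.ofList (pvWords n2))) by
    rw [h]; simp [PySem.Dict.getD_empty]
  intro l
  induction l with
  | nil => intro d; simp
  | cons x xs ih =>
    intro d
    rw [List.foldl_cons]
    cases hw : pvWords x with
    | nil => simp only [hw, List.filter_cons, ih]; simp
    | cons y ys =>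
      rw [ih]
      by_cases hy : y = w0
      · subst hy
        rw [PySem.Dict.getD_modify]
        simp [hw]
      · rw [PySem.Dict.getD_modify]
        have : ¬ (w0 = y) := fun h => hy h.symm
        simp [this, hw, beq_iff_eq, hy]

lemma pvInter_ofList_right (s : PySem.Set String) (l : List String) :
    PySem.Set.inter s (PySem.Set.ofList l) = PySem.Set.inter s l := by
  unfold PySem.Set.inter
  apply List.filter_congr
  intro x _
  simp [PySem.Set.contains_eq_listContains, List.contains_eq_mem, PySem.Set.mem_ofList]

lemma pvFoldPairAppend (n1 : String) (m : List String) : ∀ (p : List String × List String),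
    m.foldl (fun p n2 => (p.1 ++ [n1], p.2 ++ [n2])) p =
      (p.1 ++ m.map (fun _ => n1), p.2 ++ m) := by
  induction m with
  | nil => intro p; simp
  | cons x xs ih => intro p; rw [List.foldl_cons, ih]; simp

-- one name1: A's scan of all of b equals B's scan of the matching bucket
lemma pvStep_eq (threshold : Int) (b : List String) (n1 : String) (N1 N2 : List String) :
    b.foldl (pvInnerA threshold n1) (N1, N2, pvDups N1, pvDups N2) =
      (let q := pvOuterB (pvBuckets b) threshold (N1, N2) n1
       (q.1, q.2, pvDups q.1, pvDups q.2)) := by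
  have hA : b.foldl (pvInnerA threshold n1) (N1, N2, pvDups N1, pvDups N2) =
      (pvMatched threshold b n1).foldl (pvStepA n1) (N1, N2, pvDups N1, pvDups N2) := by
    rw [pvMatched, List.foldl_filter]
    rfl
  cases hw : pvWords n1 with
  | nil =>
    have hm : pvMatched threshold b n1 = [] := by
      unfold pvMatched
      apply List.filter_eq_nil_iff.mpr
      intro n2 _
      simp [pvCondA, hw]
    rw [hA, hm]
    simp [pvOuterB, hw]
  | cons w0 rest =>
    have hfil : b.filter (fun n2 =>
          decide (threshold ≤ PySem.Set.len (PySem.Set.inter (PySem.Set.ofList (w0 :: rest))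
            (PySem.Set.ofList (pvWords n2)))) &&
          match pvWords n2 with
          | [] => false
          | y :: _ => y == w0) = pvMatched threshold b n1 := by
      unfold pvMatched
      apply List.filter_congr
      intro n2 _
      rw [pvInter_ofList_right]
      cases hw2 : pvWords n2 with
      | nil => simp [pvCondA, hw]
      | cons y ys =>
        simp only [pvCondA, hw, Bool.and_comm]
        congr 1
        simp [eq_comm]
    rw [hA, pvFoldStepA]
    simp only [pvOuterB, hw, pvBuckets_getD, List.foldl_map, pvInnerB]
    rw [← List.foldl_filter, List.filter_filter, hfil, pvFoldPairAppend]

lemma pvMain (threshold : Int) (b : List String) (l : List String) :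
    ∀ (N1 N2 : List String),
    l.foldl (fun st name1 => b.foldl (pvInnerA threshold name1) st) (N1, N2, pvDups N1, pvDups N2) =
      (let q := l.foldl (pvOuterB (pvBuckets b) threshold) (N1, N2)
       (q.1, q.2, pvDups q.1, pvDups q.2)) := by
  induction l with
  | nil => intro N1 N2; rfl
  | cons n1 ns ih =>
    intro N1 N2
    rw [List.foldl_cons, List.foldl_cons, pvStep_eq]
    exact ih _ _

-- ===== VERDICT (by name: the statement is the Claim_ definition above) =====
theorem similar_names_spec : Claim_equal_similar_names := by
  intro a b threshold _ _
  unfold Spec_similar_names similar_names similar_names_alt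
  have h0 : (([], [], PySem.Set.empty, PySem.Set.empty) :
      List String × List String × PySem.Set String × PySem.Set String) =
      (([], [], pvDups [], pvDups []) : _) := rfl
  rw [h0, pvMain]
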